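-- pv_equiv track=rewrite | github.com/Bosslibra/ShashGuru | backend/fenManipulation.py | __fen_to_piece_names
-- ===== SOURCE A (Python) =====
-- import string
--
-- def __fen_to_piece_names(fen):
--     ranks = fen.split()[0].split('/')  # Extract the board layout
--     piece_names = {
--         'p': 'pawn', 'r': 'rook', 'n': 'knight', 'b': 'bishop', 'q': 'queen', 'k': 'king'
--     }
--
--     files = string.ascii_lowercase[:8]  # 'a' to 'h'
--     output = []
--
--     for rank_idx, rank in enumerate(ranks):
--         file_idx = 0  # Tracks file letter (column)
--         for char in rank:
--             if char.isdigit():  # Empty squares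
--                 for _ in range(int(char)):
--                     ## output.append(f"{files[file_idx]}{8 - rank_idx} is empty") removed because 1B freaks out
--                     file_idx += 1
--             else:  # Piece found
--                 color = 'white' if char.isupper() else 'black'
--                 piece = piece_names[char.lower()]
--                 output.append(f"{files[file_idx]}{8 - rank_idx} has a {color} {piece}")
--                 file_idx += 1
--     output.append("Every unmentioned square is empty.")
--     return ", ".join(output) + "\n"
-- ===== SOURCE B (Python) =====
-- import string
--
-- def __fen_to_piece_names(fen):
--     ranks = fen.split()[0].split('/')  # Extract the board layout
--     piece_names = {
--         'p': 'pawn', 'r': 'rook', 'n': 'knight', 'b': 'bishop', 'q': 'queen', 'k': 'king'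
--     }
--     files = string.ascii_lowercase[:8]  # 'a' to 'h'
--     output = []
--     for rank_idx, rank in enumerate(ranks):
--         # Expand the rank into one entry per square: None for empty squares.
--         squares = []
--         for char in rank:
--             if char.isdigit():
--                 squares += [None] * int(char)
--             else:
--                 squares += [char]
--         # One flat pass over the expanded rank: the position IS the file index.
--         for file_idx, char in enumerate(squares):
--             if char is not None:
--                 color = 'white' if char.isupper() else 'black'
--                 piece = piece_names[char.lower()]
--                 output.append(f"{files[file_idx]}{8 - rank_idx} has a {color} {piece}")
--     output.append("Every unmentioned square is empty.")
--     return ", ".join(output) + "\n"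
-- ===== Notes on version B (the rewrite author's own statement) =====
-- stated objective: simpler
-- what changed: B first expands each rank into an explicit per-square list (None for empty squares) and then emits descriptions in one flat enumerate pass where the position is the file index, replacing A's nested counter-advancing loop (inner range loop per digit) over the raw FEN characters.
import Mathlib
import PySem

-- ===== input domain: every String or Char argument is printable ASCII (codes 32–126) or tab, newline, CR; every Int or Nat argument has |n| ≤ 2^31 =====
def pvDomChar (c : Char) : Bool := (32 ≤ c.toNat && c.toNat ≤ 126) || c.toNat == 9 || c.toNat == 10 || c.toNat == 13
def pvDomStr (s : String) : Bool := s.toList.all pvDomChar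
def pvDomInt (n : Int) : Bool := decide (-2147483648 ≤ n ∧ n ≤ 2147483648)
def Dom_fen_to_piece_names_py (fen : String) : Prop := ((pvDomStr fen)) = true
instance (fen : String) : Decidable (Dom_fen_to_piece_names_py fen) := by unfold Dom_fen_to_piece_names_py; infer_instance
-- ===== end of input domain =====

-- B expands each rank into an explicit per-square list and emits pieces in one flat
-- enumerate pass (position = file index), instead of A's counter-advancing nested loop;
-- objective: simpler decomposition, same cost.

-- ===== PORT A =====
-- piece_names dict and files = string.ascii_lowercase[:8]; the f-string entry is
-- identical in both Pythons, so it is one shared helper.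
def pvPieceNames : PySem.Dict Char (List Char) :=
  PySem.Dict.ofList [('p', "pawn".toList), ('r', "rook".toList), ('n', "knight".toList),
                     ('b', "bishop".toList), ('q', "queen".toList), ('k', "king".toList)]

def pvFiles : List Char := PySem.Chars.slice "abcdefghijklmnopqrstuvwxyz".toList none (some 8)

-- f"{files[file_idx]}{8 - rank_idx} has a {color} {piece}"; the .getD defaults stand for
-- IndexError/KeyError, excluded by Pre_.
def pvEntry (rank_idx file_idx : Int) (c : Char) : List Char :=
  let color := if PySem.Chars.isupper c then "white".toList else "black".toList
  let piece := ((pvPieceNames.get? (PySem.Chars.lowerChar c)).getD [])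
  [PySem.List.pyGetD pvFiles file_idx ' '] ++ PySem.Int.toChars (8 - rank_idx)
    ++ " has a ".toList ++ color ++ [' '] ++ piece

def fen_to_piece_names_py (fen : String) : String :=
  let board := PySem.List.pyGetD (PySem.Str.split₀ fen) 0 ""   -- fen.split()[0]; IndexError excluded by Pre_
  let ranks := PySem.Chars.splitOn board.toList ['/']
  let output := (PySem.List.enumerate ranks 0).foldl (fun out p =>
    (p.2.foldl (fun (st : List (List Char) × Int) c =>
        if PySem.Chars.isdigit c then
          (PySem.List.pyRange 0 ((PySem.Int.ofChars? [c]).getD 0) 1).foldl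
            (fun st2 _ => (st2.1, st2.2 + 1)) st
        else (st.1 ++ [pvEntry p.1 st.2 c], st.2 + 1))
      (out, (0 : Int))).1) []
  String.ofList (PySem.Chars.join ", ".toList
    (output ++ ["Every unmentioned square is empty.".toList]) ++ ['\n'])

-- ===== PORT B =====
-- squares += [None]*int(char) / squares += [char]
def pvExpandRank (r : List Char) : List (Option Char) :=
  r.foldl (fun sq c =>
    if PySem.Chars.isdigit c then sq ++ PySem.List.pyRepeat [none] ((PySem.Int.ofChars? [c]).getD 0)
    else sq ++ [some c]) []

def fen_to_piece_names_py_alt (fen : String) : String :=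
  let board := PySem.List.pyGetD (PySem.Str.split₀ fen) 0 ""
  let ranks := PySem.Chars.splitOn board.toList ['/']
  let output := (PySem.List.enumerate ranks 0).foldl (fun out p =>
    (PySem.List.enumerate (pvExpandRank p.2) 0).foldl (fun out2 q =>
      match q.2 with
      | some c => out2 ++ [pvEntry p.1 q.1 c]
      | none => out2) out) []
  String.ofList (PySem.Chars.join ", ".toList
    (output ++ ["Every unmentioned square is empty.".toList]) ++ ['\n'])

-- ===== PRECONDITION & SPEC =====
-- Pre_ excludes exactly the inputs where Python A raises: an all-whitespace/empty fen
-- (IndexError on fen.split()[0]), a rank character that is neither a digit nor a piece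
-- letter p/r/n/b/q/k in either case (KeyError), and a piece letter at column ≥ 8
-- (IndexError on files[file_idx]).
def pvRankStep (st : Bool × Int) (c : Char) : Bool × Int :=
  if PySem.Chars.isdigit c then (st.1, st.2 + ((PySem.Int.ofChars? [c]).getD 0))
  else (st.1 && decide (st.2 < 8) && decide (PySem.Chars.lowerChar c ∈ ['p','r','n','b','q','k']),
        st.2 + 1)

def Pre_fen_to_piece_names_py (fen : String) : Prop :=
  PySem.Str.split₀ fen ≠ [] ∧
  ∀ r ∈ PySem.Chars.splitOn (PySem.List.pyGetD (PySem.Str.split₀ fen) 0 "").toList ['/'],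
    (r.foldl pvRankStep (true, 0)).1 = true

instance (fen : String) : Decidable (Pre_fen_to_piece_names_py fen) := by
  unfold Pre_fen_to_piece_names_py; infer_instance

def pvWitness_fen_to_piece_names_py : String := "rk6/8 w - - 0 1"

def Spec_fen_to_piece_names_py (fen : String) (out : String) : Prop := out = fen_to_piece_names_py_alt fen
instance (fen : String) (out : String) : Decidable (Spec_fen_to_piece_names_py fen out) := by unfold Spec_fen_to_piece_names_py; infer_instance

-- ===== CLAIM (what is proved, stated in full; the proofs are below) =====
def Claim_equal_fen_to_piece_names_py : Prop := ∀ (fen : String), Dom_fen_to_piece_names_py fen → Pre_fen_to_piece_names_py fen → Spec_fen_to_piece_names_py fen (fen_to_piece_names_py fen)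

-- ===== LEMMAS AND PROOFS =====

-- B's expansion loop, restarted from any accumulator.
lemma pvExpandRank_from (r : List Char) (acc : List (Option Char)) :
    r.foldl (fun sq c =>
      if PySem.Chars.isdigit c then sq ++ PySem.List.pyRepeat [none] ((PySem.Int.ofChars? [c]).getD 0)
      else sq ++ [some c]) acc = acc ++ pvExpandRank r := by
  induction r generalizing acc with
  | nil => simp [pvExpandRank]
  | cons c r ih =>
      unfold pvExpandRank
      simp only [List.foldl_cons]
      rw [ih, ih]
      by_cases h : PySem.Chars.isdigit c <;> simp [h]

-- A's inner 'for _ in range(...)' only advances the counter.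
lemma pvIncr_fold (l : List Int) (out : List (List Char)) (k : Int) :
    l.foldl (fun (st2 : List (List Char) × Int) _ => (st2.1, st2.2 + 1)) (out, k)
      = (out, k + (l.length : Int)) := by
  induction l generalizing k with
  | nil => simp
  | cons x l ih =>
      simp only [List.foldl_cons]
      rw [ih]
      congr 1
      push_cast [List.length_cons]
      ring

-- B emits nothing over a run of empty squares.
lemma pvCollect_replicate_none (ri : Int) (n : Nat) (k : Int) (out : List (List Char)) :
    (PySem.List.enumerate (List.replicate n (none : Option Char)) k).foldl (fun out2 q =>
      match q.2 with
      | some c => out2 ++ [pvEntry ri q.1 c]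
      | none => out2) out = out := by
  induction n generalizing k with
  | zero => simp
  | succ n ih => simp only [List.replicate_succ, PySem.List.enumerate_cons, List.foldl_cons]; exact ih (k + 1)

-- Per-rank: A's counter-advancing fold equals B's flat pass over the expanded rank.
lemma pvRank_eq (ri : Int) (r : List Char) (out : List (List Char)) (k : Int) :
    r.foldl (fun (st : List (List Char) × Int) c =>
        if PySem.Chars.isdigit c then
          (PySem.List.pyRange 0 ((PySem.Int.ofChars? [c]).getD 0) 1).foldl
            (fun st2 _ => (st2.1, st2.2 + 1)) st
        else (st.1 ++ [pvEntry ri st.2 c], st.2 + 1)) (out, k)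
      = ((PySem.List.enumerate (pvExpandRank r) k).foldl (fun out2 q =>
          match q.2 with
          | some c => out2 ++ [pvEntry ri q.1 c]
          | none => out2) out,
         k + ((pvExpandRank r).length : Int)) := by
  induction r generalizing out k with
  | nil => simp [pvExpandRank]
  | cons c r ih =>
      have hexp : pvExpandRank (c :: r)
          = (if PySem.Chars.isdigit c then
               PySem.List.pyRepeat [none] ((PySem.Int.ofChars? [c]).getD 0)
             else [some c]) ++ pvExpandRank r := by
        conv_lhs => rw [pvExpandRank]
        simp only [List.foldl_cons]
        rw [pvExpandRank_from]
        by_cases h : PySem.Chars.isdigit c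
        · rw [if_pos h, if_pos h, List.nil_append]
        · rw [if_neg h, if_neg h, List.nil_append]
      simp only [List.foldl_cons]
      by_cases h : PySem.Chars.isdigit c
      · rw [if_pos h, pvIncr_fold, ih, hexp, if_pos h]
        rw [PySem.List.pyRepeat_singleton, PySem.List.enumerate_append, List.foldl_append,
          pvCollect_replicate_none]
        have hlen : (PySem.List.pyRange 0 ((PySem.Int.ofChars? [c]).getD 0) 1).length
            = (List.replicate ((PySem.Int.ofChars? [c]).getD 0).toNat (none : Option Char)).length := by
          simp [PySem.List.pyRange]
          omega
        simp only [Prod.mk.injEq]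
        refine ⟨by rw [hlen], by rw [hlen, List.length_append]; push_cast; ring⟩
      · rw [if_neg h, ih, hexp, if_neg h]
        rw [PySem.List.enumerate_append]
        simp only [PySem.List.enumerate_cons, PySem.List.enumerate_nil, List.foldl_append,
          List.foldl_cons, List.foldl_nil, List.length_append, List.length_cons,
          List.length_nil]
        simp only [Prod.mk.injEq]
        refine ⟨by norm_num, by push_cast; ring⟩

-- The whole output list is the same.
lemma pvOutput_eq (ranks : List (Int × List Char)) (out : List (List Char)) :
    ranks.foldl (fun out p =>
      (p.2.foldl (fun (st : List (List Char) × Int) c =>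
          if PySem.Chars.isdigit c then
            (PySem.List.pyRange 0 ((PySem.Int.ofChars? [c]).getD 0) 1).foldl
              (fun st2 _ => (st2.1, st2.2 + 1)) st
          else (st.1 ++ [pvEntry p.1 st.2 c], st.2 + 1))
        (out, (0 : Int))).1) out
    = ranks.foldl (fun out p =>
        (PySem.List.enumerate (pvExpandRank p.2) 0).foldl (fun out2 q =>
          match q.2 with
          | some c => out2 ++ [pvEntry p.1 q.1 c]
          | none => out2) out) out := by
  simp only [pvRank_eq]

theorem pv_ports_eq (fen : String) : fen_to_piece_names_py fen = fen_to_piece_names_py_alt fen := by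
  simp only [fen_to_piece_names_py, fen_to_piece_names_py_alt]
  rw [pvOutput_eq]

-- ===== VERDICT (by name: the statement is the Claim_ definition above) =====
theorem fen_to_piece_names_py_spec : Claim_equal_fen_to_piece_names_py := by
  intro fen _ _
  unfold Spec_fen_to_piece_names_py
  exact pv_ports_eq fen
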